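-- pv_equiv track=rewrite | github.com/eden101-cmd/OneBiProject | q1/Transcripts_In_List.py | separate_transcripts
-- ===== SOURCE A (Python) =====
-- def separate_transcripts(transcript_text):
--     """this function takes a transcript_text input and processes
--     it to separate individual transcripts."""
--     lines = transcript_text.strip().split('\n')
--
--     transcripts = []
--     current_transcript = ""
--
--     for line in lines:
--         if line.startswith("Transcript"):
--             if current_transcript:
--                 transcripts.append(current_transcript.strip())
--             current_transcript = line + "\n"
--         else:
--             current_transcript += line + "\n"
--
--     if current_transcript:
--         transcripts.append(current_transcript.strip())
--
--     return transcripts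
-- ===== SOURCE B (Python) =====
-- def separate_transcripts(transcript_text):
--     """Index-based: find the header line positions, then slice the block out
--     between consecutive boundaries."""
--     lines = transcript_text.strip().split('\n')
--     starts = [i for i, line in enumerate(lines) if line.startswith("Transcript")]
--     if not starts or starts[0] > 0:
--         starts = [0] + starts
--     bounds = starts + [len(lines)]
--     return ['\n'.join(lines[a:b]).strip() for a, b in zip(bounds, bounds[1:])]
-- ===== Notes on version B (the rewrite author's own statement) =====
-- stated objective: alternative
-- what changed: Replaces A's single pass with a growing string buffer and flush-on-header logic by a two-phase index computation: first collect the positions of the header lines, turn them into segment boundaries, then slice each block out of the line list and join/strip it.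
import Mathlib
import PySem

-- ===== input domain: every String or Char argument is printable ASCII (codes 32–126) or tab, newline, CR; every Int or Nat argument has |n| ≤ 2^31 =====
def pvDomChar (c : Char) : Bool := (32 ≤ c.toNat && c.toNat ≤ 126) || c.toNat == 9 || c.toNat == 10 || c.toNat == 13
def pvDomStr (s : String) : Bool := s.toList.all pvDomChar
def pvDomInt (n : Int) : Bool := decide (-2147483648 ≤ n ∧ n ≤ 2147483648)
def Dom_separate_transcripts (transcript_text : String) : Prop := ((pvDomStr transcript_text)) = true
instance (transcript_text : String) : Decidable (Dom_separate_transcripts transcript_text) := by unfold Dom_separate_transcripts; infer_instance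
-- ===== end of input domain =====

-- B finds the header-line indices first and then slices each block out between
-- consecutive boundaries, instead of A's single pass with a growing string buffer
-- (objective: alternative decomposition, same cost).

-- ===== PORT A =====
-- loop of A: state = (transcripts, current_transcript), lines processed left to right
def pvALoop : List (List Char) → List (List Char) → List Char → List (List Char)
  | [], ts, cur => if cur ≠ [] then ts ++ [PySem.Chars.strip cur] else ts
  | l :: rest, ts, cur =>
    if PySem.Chars.startswith l "Transcript".toList then
      pvALoop rest (if cur ≠ [] then ts ++ [PySem.Chars.strip cur] else ts) (l ++ ['\n'])
    else
      pvALoop rest ts (cur ++ (l ++ ['\n']))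

def separate_transcripts (transcript_text : String) : List String :=
  (pvALoop (PySem.Chars.splitOn (PySem.Chars.strip transcript_text.toList) ['\n']) [] []).map String.ofList

-- ===== PORT B =====
-- starts = [i for i, line in enumerate(lines) if line.startswith("Transcript")]
def pvBStarts (lines : List (List Char)) : List Int :=
  ((PySem.List.enumerate lines 0).filter
      (fun p => PySem.Chars.startswith p.2 "Transcript".toList)).map (·.1)

-- if not starts or starts[0] > 0: starts = [0] + starts
def pvBStarts' (starts : List Int) : List Int :=
  match starts with
  | [] => [(0 : Int)]
  | s :: _ => if 0 < s then (0 : Int) :: starts else starts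

-- bounds = starts + [len(lines)]
def pvBBounds (lines : List (List Char)) : List Int :=
  pvBStarts' (pvBStarts lines) ++ [(lines.length : Int)]

-- ['\n'.join(lines[a:b]).strip() for a, b in zip(bounds, bounds[1:])]
def pvBCore (lines : List (List Char)) : List String :=
  ((pvBBounds lines).zip (PySem.List.slice (pvBBounds lines) (some 1) none)).map
    (fun ab => String.ofList (PySem.Chars.strip
      (PySem.Chars.join ['\n'] (PySem.List.slice lines (some ab.1) (some ab.2)))))

def separate_transcripts_alt (transcript_text : String) : List String :=
  pvBCore (PySem.Chars.splitOn (PySem.Chars.strip transcript_text.toList) ['\n'])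

-- ===== PRECONDITION & SPEC =====
def Spec_separate_transcripts (transcript_text : String) (out : List String) : Prop := out = separate_transcripts_alt transcript_text
instance (transcript_text : String) (out : List String) : Decidable (Spec_separate_transcripts transcript_text out) := by unfold Spec_separate_transcripts; infer_instance

-- ===== CLAIM (what is proved, stated in full; the proofs are below) =====
def Claim_equal_separate_transcripts : Prop := ∀ (transcript_text : String), Dom_separate_transcripts transcript_text → Spec_separate_transcripts transcript_text (separate_transcripts transcript_text)

-- ===== LEMMAS AND PROOFS =====

-- proof-side predicate: line is NOT a 'Transcript' header
def pvNm (l : List Char) : Bool := !(PySem.Chars.startswith l "Transcript".toList)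

-- proof-side segmentation spec: segsM lines = blocks, assuming lines begins at a block head
def pvSegsM : List (List Char) → List (List (List Char))
  | [] => []
  | m :: rest => (m :: rest.takeWhile pvNm) :: pvSegsM (rest.dropWhile pvNm)
termination_by l => l.length
decreasing_by
  simp only [List.length_cons]
  have := List.length_dropWhile_le pvNm rest
  omega

def pvFin (seg : List (List Char)) : List Char := PySem.Chars.strip (PySem.Chars.join ['\n'] seg)
def pvCat (seg : List (List Char)) : List Char := (seg.map (· ++ ['\n'])).flatten
def pvFinA (seg : List (List Char)) : List Char := PySem.Chars.strip (pvCat seg)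

-- the segments of a line list: optional leading non-header block, then header-led blocks
def pvSegs (lines : List (List Char)) : List (List (List Char)) :=
  (if lines.takeWhile pvNm = [] then [] else [lines.takeWhile pvNm]) ++
    pvSegsM (lines.dropWhile pvNm)

-- boundary offsets of a segment list, starting at position k
def pvOffs : List (List (List Char)) → Nat → List Int
  | [], _ => []
  | s :: r, k => ((k : Nat) : Int) :: pvOffs r (k + s.length)

theorem pv_strip_append_nl (x : List Char) :
    PySem.Chars.strip (x ++ ['\n']) = PySem.Chars.strip x := by
  unfold PySem.Chars.strip PySem.Chars.lstrip PySem.Chars.rstrip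
  rw [List.dropWhile_append]
  by_cases h : (List.dropWhile PySem.Chars.isspace x).isEmpty
  · simp [List.isEmpty_iff.mp h, show PySem.Chars.isspace '\n' = true from by decide]
  · simp [h, List.reverse_append, show PySem.Chars.isspace '\n' = true from by decide]

theorem pv_cat_eq (seg : List (List Char)) (h : seg ≠ []) :
    pvCat seg = PySem.Chars.join ['\n'] seg ++ ['\n'] := by
  induction seg with
  | nil => exact absurd rfl h
  | cons l rest ih =>
    cases rest with
    | nil => simp [pvCat, PySem.Chars.join, List.intercalate]
    | cons m t =>
      simp only [pvCat, List.map_cons, List.flatten_cons] at *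
      rw [ih (by simp)]
      simp [PySem.Chars.join, List.intercalate, List.intersperse]

theorem pv_finA_eq_fin (seg : List (List Char)) : pvFinA seg = pvFin seg := by
  cases seg with
  | nil => simp [pvFinA, pvFin, pvCat, PySem.Chars.join, List.intercalate]
  | cons l t =>
    unfold pvFinA pvFin
    rw [pv_cat_eq _ (by simp), pv_strip_append_nl]

theorem pv_aLoop_ne (lines : List (List Char)) :
    ∀ ts cur, cur ≠ [] →
    pvALoop lines ts cur =
      ts ++ PySem.Chars.strip (cur ++ pvCat (lines.takeWhile pvNm)) ::
        (pvSegsM (lines.dropWhile pvNm)).map pvFinA := by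
  induction lines with
  | nil => intro ts cur h; simp [pvALoop, h, pvCat, pvSegsM]
  | cons l rest ih =>
    intro ts cur h
    by_cases hm : PySem.Chars.startswith l "Transcript".toList = true
    · have hnm : pvNm l = false := by simp only [pvNm, Bool.not_eq_false']; exact hm
      simp only [pvALoop]
      rw [if_pos hm, if_pos h, ih _ _ (by simp)]
      rw [List.takeWhile_cons_of_neg (by simp [hnm]), List.dropWhile_cons_of_neg (by simp [hnm])]
      rw [pvSegsM]
      simp [pvCat, pvFinA]
    · have hnm : pvNm l = true := by simp only [pvNm, Bool.not_eq_true']; exact Bool.eq_false_iff.mpr hm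
      simp only [pvALoop]
      rw [if_neg hm, ih _ _ (by simp [h])]
      rw [List.takeWhile_cons_of_pos (by simp [hnm]), List.dropWhile_cons_of_pos (by simp [hnm])]
      simp [pvCat]

theorem pv_aLoop_nil (lines : List (List Char)) (ts : List (List Char)) :
    pvALoop lines ts [] = ts ++ (pvSegs lines).map pvFinA := by
  cases lines with
  | nil => simp [pvALoop, pvSegs, pvSegsM]
  | cons l rest =>
    by_cases hm : PySem.Chars.startswith l "Transcript".toList = true
    · have hnm : pvNm l = false := by simp only [pvNm, Bool.not_eq_false']; exact hm
      simp only [pvALoop]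
      rw [if_pos hm, if_neg (by simp), pv_aLoop_ne _ _ _ (by simp)]
      unfold pvSegs
      rw [List.takeWhile_cons_of_neg (by simp [hnm]), List.dropWhile_cons_of_neg (by simp [hnm])]
      rw [pvSegsM]
      simp [pvCat, pvFinA]
    · have hnm : pvNm l = true := by simp only [pvNm, Bool.not_eq_true']; exact Bool.eq_false_iff.mpr hm
      simp only [pvALoop]
      rw [if_neg hm, pv_aLoop_ne _ _ _ (by simp)]
      unfold pvSegs
      rw [List.takeWhile_cons_of_pos (by simp [hnm]), List.dropWhile_cons_of_pos (by simp [hnm])]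
      have hne : (l :: rest.takeWhile pvNm) ≠ [] := by simp
      simp only [hne, reduceIte]
      simp [pvCat, pvFinA]

-- splitOn never returns the empty list
theorem pv_splitOn_go_ne_nil (sep : List Char) :
    ∀ fuel l cur acc, PySem.Chars.splitOn.go sep fuel l cur acc ≠ [] := by
  intro fuel
  induction fuel with
  | zero => intro l cur acc; simp [PySem.Chars.splitOn.go]
  | succ n ih =>
    intro l cur acc
    cases l with
    | nil => simp [PySem.Chars.splitOn.go]
    | cons c rest =>
      rw [PySem.Chars.splitOn.go]
      split_ifs
      · exact ih _ _ _
      · exact ih _ _ _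

theorem pv_splitOn_ne_nil (l sep : List Char) : PySem.Chars.splitOn l sep ≠ [] := by
  unfold PySem.Chars.splitOn; exact pv_splitOn_go_ne_nil _ _ _ _ _

-- head of dropWhile fails the predicate
theorem pv_dropWhile_head {α : Type} (p : α → Bool) :
    ∀ (l : List α) x xs, l.dropWhile p = x :: xs → p x = false := by
  intro l
  induction l with
  | nil => intro x xs h; simp at h
  | cons a t ih =>
    intro x xs h
    by_cases ha : p a
    · rw [List.dropWhile_cons_of_pos ha] at h; exact ih _ _ h
    · rw [List.dropWhile_cons_of_neg ha] at h
      cases h; simpa using ha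

-- shape of the header-led segmentation: every segment is a header line plus non-headers
theorem pv_segsM_shape (l : List (List Char))
    (hl : ∀ m rest, l = m :: rest → pvNm m = false) :
    ∀ s ∈ pvSegsM l, ∃ m tl, s = m :: tl ∧ pvNm m = false ∧ ∀ x ∈ tl, pvNm x = true := by
  induction l using pvSegsM.induct with
  | case1 => intro s hs; simp [pvSegsM] at hs
  | case2 m rest ih =>
    intro s hs
    rw [pvSegsM] at hs
    rcases List.mem_cons.mp hs with h | h
    · exact ⟨m, rest.takeWhile pvNm, h, hl m rest rfl,
        fun x hx => List.mem_takeWhile_imp hx⟩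
    · exact ih (fun m' r' h' => pv_dropWhile_head pvNm rest m' r' h') s h

theorem pv_segsM_flatten (l : List (List Char)) : (pvSegsM l).flatten = l := by
  induction l using pvSegsM.induct with
  | case1 => simp [pvSegsM]
  | case2 m rest ih =>
    rw [pvSegsM]
    simp [ih, List.takeWhile_append_dropWhile]

theorem pv_segs_flatten (lines : List (List Char)) : (pvSegs lines).flatten = lines := by
  unfold pvSegs
  by_cases h : lines.takeWhile pvNm = []
  · have hdw : lines.dropWhile pvNm = lines := by
      conv_rhs => rw [← List.takeWhile_append_dropWhile (p := pvNm) (l := lines)]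
      rw [h]; simp
    simp [h, pv_segsM_flatten, hdw]
  · simp [h, pv_segsM_flatten, List.takeWhile_append_dropWhile]

-- enumerate of all-non-header lines contributes no markers
theorem pv_filter_nonmark (xs : List (List Char)) (k : Int)
    (h : ∀ x ∈ xs, pvNm x = true) :
    (PySem.List.enumerate xs k).filter
      (fun p => PySem.Chars.startswith p.2 "Transcript".toList) = [] := by
  rw [List.filter_eq_nil_iff]
  intro p hp
  rcases (PySem.List.mem_enumerate_iff _ _ _).mp hp with ⟨j, hj, rfl⟩
  have := h _ (List.getElem_mem hj)
  simp only [pvNm, Bool.not_eq_true'] at this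
  simpa using this

-- marker positions of a flattened header-led segment list are the segment offsets
theorem pv_marks (segs : List (List (List Char))) :
    ∀ k : Nat,
    (∀ s ∈ segs, ∃ m tl, s = m :: tl ∧ pvNm m = false ∧ ∀ x ∈ tl, pvNm x = true) →
    ((PySem.List.enumerate segs.flatten ((k : Nat) : Int)).filter
      (fun p => PySem.Chars.startswith p.2 "Transcript".toList)).map (·.1) = pvOffs segs k := by
  induction segs with
  | nil => intro k _; simp [pvOffs, PySem.List.enumerate_nil]
  | cons s r ih =>
    intro k hshape
    obtain ⟨m, tl, rfl, hm, htl⟩ := hshape s (List.mem_cons_self ..)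
    simp only [List.flatten_cons]
    rw [PySem.List.enumerate_append, List.filter_append, List.map_append]
    rw [PySem.List.enumerate_cons, List.filter_cons]
    have hmk : PySem.Chars.startswith m "Transcript".toList = true := by
      simp only [pvNm, Bool.not_eq_false'] at hm; exact hm
    simp only [hmk, reduceIte]
    rw [pv_filter_nonmark _ _ htl]
    have harith : ((k : Int) + ((m :: tl).length : Int)) = (((k + (m :: tl).length : Nat)) : Int) := by
      push_cast; ring
    rw [harith, ih _ (fun s hs => hshape s (List.mem_cons_of_mem _ hs))]
    simp [pvOffs]

-- consecutive boundary pairs slice the flattened list back into its segments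
theorem pv_slices : ∀ (segs : List (List (List Char))) (u lines : List (List Char)),
    lines = u ++ segs.flatten →
    (((pvOffs segs u.length ++ [((lines.length : Nat) : Int)]).zip
        (pvOffs segs u.length ++ [((lines.length : Nat) : Int)]).tail).map
      (fun ab => PySem.List.slice lines (some ab.1) (some ab.2))) = segs := by
  intro segs
  induction segs with
  | nil => intro u lines h; simp [pvOffs]
  | cons s r ih =>
    intro u lines h
    have hfirst : PySem.List.slice lines (some ((u.length : Nat) : Int))
        (some (((u.length + s.length : Nat)) : Int)) = s := by
      have hb : (((u.length + s.length : Nat)) : Int) =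
          ((u.length : Nat) : Int) + ((s.length : Nat) : Int) := by push_cast; ring
      rw [hb, PySem.List.slice_natCast_add, h, List.flatten_cons, List.drop_left,
        List.take_left]
    cases r with
    | nil =>
      have hlen : lines.length = u.length + s.length := by simp [h]
      simp only [pvOffs, List.cons_append, List.nil_append, List.zip_cons_cons, List.tail_cons,
        List.zip_nil_right, List.map_cons, List.map_nil]
      rw [show ((lines.length : Nat) : Int) = (((u.length + s.length : Nat)) : Int) from
        by rw [hlen]]
      rw [hfirst]
    | cons r0 r' =>
      have h' : lines = (u ++ s) ++ (r0 :: r').flatten := by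
        simp [h, List.flatten_cons, List.append_assoc]
      have hIH := ih (u ++ s) lines h'
      simp only [pvOffs, List.cons_append, List.zip_cons_cons, List.tail_cons,
        List.map_cons, List.cons.injEq, List.length_append] at hIH ⊢
      exact ⟨hfirst, hIH⟩

-- B's header indices are the offsets of the header-led segments
theorem pv_starts (lines : List (List Char)) :
    pvBStarts lines =
      pvOffs (pvSegsM (lines.dropWhile pvNm)) (lines.takeWhile pvNm).length := by
  unfold pvBStarts
  nth_rewrite 1 [← List.takeWhile_append_dropWhile (p := pvNm) (l := lines)]
  rw [PySem.List.enumerate_append, List.filter_append, List.map_append]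
  rw [pv_filter_nonmark _ _ (fun x hx => List.mem_takeWhile_imp hx)]
  have h0 : ((0 : Int) + ((lines.takeWhile pvNm).length : Int)) =
      (((lines.takeWhile pvNm).length : Nat) : Int) := by ring
  rw [h0]
  have hmk := pv_marks (pvSegsM (lines.dropWhile pvNm)) (lines.takeWhile pvNm).length
    (pv_segsM_shape _ (fun m r hmr => pv_dropWhile_head pvNm _ m r hmr))
  rw [pv_segsM_flatten] at hmk
  simpa using hmk

-- B's boundary list is offsets of all segments plus the end of the line list
theorem pv_bounds (lines : List (List Char)) (hne : lines ≠ []) :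
    pvBBounds lines = pvOffs (pvSegs lines) 0 ++ [((lines.length : Nat) : Int)] := by
  unfold pvBBounds
  rw [pv_starts]
  congr 1
  unfold pvBStarts'
  by_cases htw : lines.takeWhile pvNm = []
  · -- no leading block: lines itself starts with a header line
    have hdw : lines.dropWhile pvNm = lines := by
      conv_rhs => rw [← List.takeWhile_append_dropWhile (p := pvNm) (l := lines)]
      rw [htw]; simp
    unfold pvSegs
    rw [htw, hdw]
    cases lines with
    | nil => exact absurd rfl hne
    | cons m rest =>
      rw [pvSegsM]
      simp [pvOffs]
  · -- leading block present
    unfold pvSegs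
    simp only [htw, reduceIte, List.singleton_append]
    cases hdw : lines.dropWhile pvNm with
    | nil => simp [pvSegsM, pvOffs]
    | cons m rest =>
      have hpos : (0 : Int) < (((lines.takeWhile pvNm).length : Nat) : Int) := by
        exact_mod_cast List.length_pos_of_ne_nil htw
      have hseg : pvSegsM (m :: rest) =
          (m :: rest.takeWhile pvNm) :: pvSegsM (rest.dropWhile pvNm) := by rw [pvSegsM]
      rw [hseg]
      simp only [pvOffs, pvBStarts']
      rw [if_pos hpos]
      simp [pvOffs]

-- B's pipeline on a non-empty line list produces exactly the finished segments
theorem pv_bcore (lines : List (List Char)) (hne : lines ≠ []) :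
    pvBCore lines = (pvSegs lines).map (fun s => String.ofList (pvFin s)) := by
  unfold pvBCore
  rw [pv_bounds _ hne, PySem.List.slice_from_one]
  have hs := pv_slices (pvSegs lines) [] lines (by rw [pv_segs_flatten]; rfl)
  simp only [List.length_nil] at hs
  rw [show (fun ab : Int × Int => String.ofList (PySem.Chars.strip
      (PySem.Chars.join ['\n'] (PySem.List.slice lines (some ab.1) (some ab.2))))) =
    (fun s => String.ofList (pvFin s)) ∘
      (fun ab : Int × Int => PySem.List.slice lines (some ab.1) (some ab.2)) from rfl]
  rw [← List.map_map, hs]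

-- ===== VERDICT (by name: the statement is the Claim_ definition above) =====
theorem separate_transcripts_spec : Claim_equal_separate_transcripts := by
  intro t _
  unfold Spec_separate_transcripts
  simp only [separate_transcripts, separate_transcripts_alt]
  rw [pv_aLoop_nil, pv_bcore _ (pv_splitOn_ne_nil _ _)]
  simp [List.map_map, Function.comp_def, pv_finA_eq_fin]
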